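-- pv_equiv track=rewrite | github.com/dgabrielson/django-dept-mgmt | office_mgmt/utils/fdfgen/__init__.py | escape_pdf_name
-- ===== SOURCE A (Python) =====
-- def escape_pdf_name(ss):
--     ss_esc = []
--     for c in ss:
--         if (ord(c) < 33) or (126 < ord(c)) or (ord(c) == 0x23):
--             ss_esc.append("#%02x" % ord(c))
--         else:
--             ss_esc.append(c)
--     return "".join(ss_esc)
-- ===== SOURCE B (Python) =====
-- import re
--
-- _PAT = re.compile(r'[^\x21-\x22\x24-\x7e]')
--
-- def escape_pdf_name(ss):
--     return _PAT.sub(lambda m: '#%02x' % ord(m.group()), ss)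
-- ===== Notes on version B (the rewrite author's own statement) =====
-- stated objective: faster
-- what changed: Replaced the explicit per-character loop with list accumulation and join by a single re.sub over a precompiled character class matching exactly the escape set (everything outside codes 33-126 plus the hash character), with a callback producing the same two-digit lowercase hex escapes.
import Mathlib
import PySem

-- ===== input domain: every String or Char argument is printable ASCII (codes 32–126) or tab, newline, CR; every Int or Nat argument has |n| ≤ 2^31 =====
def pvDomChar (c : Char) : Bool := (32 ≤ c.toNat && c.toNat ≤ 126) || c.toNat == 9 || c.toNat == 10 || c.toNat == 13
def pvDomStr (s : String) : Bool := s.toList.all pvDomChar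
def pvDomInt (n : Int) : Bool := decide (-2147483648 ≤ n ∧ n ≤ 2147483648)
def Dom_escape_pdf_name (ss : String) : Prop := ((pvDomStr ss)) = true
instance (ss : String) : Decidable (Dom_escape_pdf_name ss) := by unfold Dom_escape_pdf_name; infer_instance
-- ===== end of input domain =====

-- B replaces A's explicit per-character loop + join with a single regex substitution; proved equal on Dom; a timing run measured B faster (C regex engine vs per-char Python loop).

-- shared formatting helper: "#%02x" % n  (lowercase hex, zero-padded to width 2)
def pvFmtHash02x (n : Nat) : List Char :=
  let ds := Nat.toDigits 16 n
  '#' :: (List.replicate (2 - ds.length) '0' ++ ds)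

-- ===== PORT A =====
-- literal transliteration: accumulate per-character pieces, then "".join
def escape_pdf_name (ss : String) : String :=
  let ss_esc := ss.toList.foldl (fun acc c =>
    if c.toNat < 33 ∨ 126 < c.toNat ∨ c.toNat = 0x23 then
      acc ++ [String.ofList (pvFmtHash02x c.toNat)]
    else
      acc ++ [String.ofList [c]]) []
  PySem.Str.join "" ss_esc

-- ===== PORT B =====
-- regex sub over the class [^\x21-\x22\x24-\x7e] with callback '#%02x' % ord(c):
-- ported as the substitution the regex engine performs — each non-matching char kept,
-- each matching char replaced, concatenated in one pass.
def pvReClassNeg (c : Char) : Bool :=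
  -- membership in [^\x21-\x22\x24-\x7e]
  !((0x21 ≤ c.toNat && c.toNat ≤ 0x22) || (0x24 ≤ c.toNat && c.toNat ≤ 0x7e))

def escape_pdf_name_alt (ss : String) : String :=
  String.ofList (ss.toList.flatMap fun c =>
    if pvReClassNeg c then pvFmtHash02x c.toNat else [c])

-- ===== PRECONDITION & SPEC =====
def Spec_escape_pdf_name (ss : String) (out : String) : Prop := out = escape_pdf_name_alt ss
instance (ss : String) (out : String) : Decidable (Spec_escape_pdf_name ss out) := by unfold Spec_escape_pdf_name; infer_instance

-- ===== CLAIM (what is proved, stated in full; the proofs are below) =====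
def Claim_equal_escape_pdf_name : Prop := ∀ (ss : String), Dom_escape_pdf_name ss → Spec_escape_pdf_name ss (escape_pdf_name ss)

-- ===== LEMMAS AND PROOFS =====

-- the two escape conditions coincide
theorem pv_cond_eq (c : Char) :
    (c.toNat < 33 ∨ 126 < c.toNat ∨ c.toNat = 0x23) ↔ pvReClassNeg c = true := by
  simp [pvReClassNeg]
  omega

-- A's foldl-append loop produces acc ++ map
theorem pv_foldl_map {α β : Type} (g : α → β) :
    ∀ (l : List α) (acc : List β),
      l.foldl (fun a c => a ++ [g c]) acc = acc ++ l.map g := by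
  intro l
  induction l with
  | nil => simp
  | cons c l ih => intro acc; simp [List.foldl_cons, ih]

-- "".join of mapped singleton strings = String.ofList of the flatMap
theorem pv_intercalate_nil {α : Type} :
    ∀ (l : List (List α)), List.intercalate [] l = l.flatten := by
  intro l
  induction l with
  | nil => simp [List.intercalate]
  | cons x l ih =>
      cases l with
      | nil => simp [List.intercalate]
      | cons y t => simp_all [List.intercalate, List.intersperse]

theorem pv_join_eq (h : Char → List Char) (l : List Char) :
    PySem.Str.join "" (l.map fun c => String.ofList (h c)) = String.ofList (l.flatMap h) := by
  apply String.ext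
  simp [PySem.Str.toList_join, PySem.Chars.join, pv_intercalate_nil,
    String.toList_ofList, Function.comp_def, List.flatMap_def]

theorem escape_pdf_name_eq (ss : String) :
    escape_pdf_name ss = escape_pdf_name_alt ss := by
  simp only [escape_pdf_name, escape_pdf_name_alt]
  have hstep : (fun (acc : List String) (c : Char) =>
        if c.toNat < 33 ∨ 126 < c.toNat ∨ c.toNat = 0x23 then
          acc ++ [String.ofList (pvFmtHash02x c.toNat)]
        else acc ++ [String.ofList [c]])
      = fun acc c => acc ++ [String.ofList (if pvReClassNeg c then pvFmtHash02x c.toNat else [c])] := by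
    funext acc c
    by_cases h : pvReClassNeg c = true
    · rw [if_pos ((pv_cond_eq c).mpr h), if_pos h]
    · rw [if_neg (fun hc => h ((pv_cond_eq c).mp hc)), if_neg h]
  rw [hstep, pv_foldl_map (fun c => String.ofList (if pvReClassNeg c then pvFmtHash02x c.toNat else [c])),
    List.nil_append]
  exact pv_join_eq _ ss.toList

-- ===== VERDICT (by name: the statement is the Claim_ definition above) =====
theorem escape_pdf_name_spec : Claim_equal_escape_pdf_name := by
  intro ss _
  exact escape_pdf_name_eq ss
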